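-- pv_equiv track=rewrite | github.com/Kawser-nerd/CLCDSA | Source Codes/AtCoder/abc027/C/4925836.py | baibai_chance
-- ===== SOURCE A (Python) =====
-- def baibai_chance(N: int) -> str:
--     depth = 0
--     n = N
--     while 1 < n:
--         depth += 1
--         n >>= 1
--
--     def m2(x): return x << 1
--     def m2p1(x): return (x << 1) + 1
--
--     if depth % 2 == 0:
--         Tst, Ast = m2p1, m2
--     else:
--         Tst, Ast = m2, m2p1
--
--     x = 1
--     while True:
--         # Takahashi ???
--         x = Tst(x)
--         if N < x:
--             return "Aoki"
--
--         # Aoki ???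
--         x = Ast(x)
--         if N < x:
--             return 'Takahashi'
-- ===== SOURCE B (Python) =====
-- def baibai_chance(N: int) -> str:
--     if N < 2:
--         return "Aoki"
--     depth = N.bit_length() - 1
--     # threshold: leading 1 followed by `depth` alternating bits
--     T = 1
--     for i in range(depth):
--         T = T * 2 + (1 if (i % 2 == 0) == (depth % 2 == 0) else 0)
--     if T > N:
--         return "Takahashi" if depth % 2 == 0 else "Aoki"
--     return "Aoki" if depth % 2 == 0 else "Takahashi"
-- ===== Notes on version B (the rewrite author's own statement) =====
-- stated objective: simpler
-- what changed: Instead of simulating both players' doublings until one overflows N, B computes depth (one less than N's bit length), builds the single overflow threshold (binary 1 followed by depth alternating bits) in one pass, and decides the winner with one comparison against N.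
import Mathlib
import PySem

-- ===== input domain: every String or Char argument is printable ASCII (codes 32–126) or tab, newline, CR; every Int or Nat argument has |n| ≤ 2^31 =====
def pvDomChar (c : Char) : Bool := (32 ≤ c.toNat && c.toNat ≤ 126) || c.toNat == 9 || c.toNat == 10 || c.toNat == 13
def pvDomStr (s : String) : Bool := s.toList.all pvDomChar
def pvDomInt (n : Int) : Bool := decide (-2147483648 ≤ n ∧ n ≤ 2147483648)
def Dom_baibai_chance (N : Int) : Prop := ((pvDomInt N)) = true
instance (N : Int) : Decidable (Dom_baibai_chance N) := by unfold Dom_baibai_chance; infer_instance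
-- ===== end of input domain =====

-- B replaces A's simulate-both-players-until-overflow loop by building the single
-- overflow threshold (1 followed by `depth` alternating bits) and comparing it to N once (objective: simpler).

-- ===== PORT A =====
-- while 1 < n: depth += 1; n >>= 1   (Python '>>' on int = Lean '>>>' on Int, exact)
def pvDepthLoop (n : Int) (depth : Int) : Int :=
  if _h : 1 < n then pvDepthLoop (n >>> (1:Nat)) (depth + 1) else depth
termination_by n.toNat
decreasing_by
  rw [Int.shiftRight_eq_div_pow]
  simp only [pow_one]
  omega

def pvM2 (x : Int) : Int := x <<< (1:Nat)          -- x << 1 (exact)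
def pvM2p1 (x : Int) : Int := (x <<< (1:Nat)) + 1  -- (x << 1) + 1 (exact)

-- Tst / Ast as selected by `if depth % 2 == 0` (p = that condition)
def pvTst (p : Bool) (x : Int) : Int := if p then pvM2p1 x else pvM2 x
def pvAst (p : Bool) (x : Int) : Int := if p then pvM2 x else pvM2p1 x

theorem pv_one_le_step (p : Bool) (x : Int) (hx : 1 ≤ x) : 1 ≤ pvAst p (pvTst p x) := by
  simp only [pvAst, pvTst, pvM2, pvM2p1, Int.shiftLeft_eq, pow_one]
  cases p <;> simp <;> omega

-- the `while True` loop; x starts at 1 and stays ≥ 1, which gives termination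
def pvGameLoop (N : Int) (p : Bool) (x : Int) (hx : 1 ≤ x) : String :=
  if N < pvTst p x then "Aoki"
  else if N < pvAst p (pvTst p x) then "Takahashi"
  else pvGameLoop N p (pvAst p (pvTst p x)) (pv_one_le_step p x hx)
termination_by (N - x).toNat
decreasing_by
  rename_i h1 h2
  have hgt : x < pvAst p (pvTst p x) := by
    simp only [pvAst, pvTst, pvM2, pvM2p1, Int.shiftLeft_eq, pow_one] at *
    cases p <;> simp at * <;> omega
  omega

def baibai_chance (N : Int) : String :=
  let depth := pvDepthLoop N 0
  let p := PySem.Int.mod depth 2 == 0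
  pvGameLoop N p 1 (by norm_num)

-- ===== PORT B =====
def baibai_chance_alt (N : Int) : String :=
  if N < 2 then "Aoki"
  else
    -- N.bit_length() minus one; exact for N ≥ 2 (PySem.Int.bitLength is Python's bit_length)
    let depth : Nat := PySem.Int.bitLength N - 1
    let p : Bool := depth % 2 == 0
    let T : Int := (PySem.List.pyRange 0 (depth : Int) 1).foldl
      (fun T i => T * 2 + (if (PySem.Int.mod i 2 == 0) == p then 1 else 0)) 1
    if T > N then (if p then "Takahashi" else "Aoki")
    else (if p then "Aoki" else "Takahashi")

-- ===== PRECONDITION & SPEC =====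
def Spec_baibai_chance (N : Int) (out : String) : Prop := out = baibai_chance_alt N
instance (N : Int) (out : String) : Decidable (Spec_baibai_chance N out) := by unfold Spec_baibai_chance; infer_instance

-- ===== CLAIM (what is proved, stated in full; the proofs are below) =====
def Claim_equal_baibai_chance : Prop := ∀ (N : Int), Dom_baibai_chance N → Spec_baibai_chance N (baibai_chance N)

-- ===== LEMMAS AND PROOFS =====

-- the sequence of x-values: 1 followed by alternating bits (B's threshold at k = depth)
def pvSeq (p : Bool) (k : Nat) : Int :=
  (List.range k).foldl (fun T i => T * 2 + (if (i % 2 == 0) == p then 1 else 0)) 1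

theorem pvSeq_succ (p : Bool) (k : Nat) :
    pvSeq p (k + 1) = pvSeq p k * 2 + (if (k % 2 == 0) == p then 1 else 0) := by
  simp [pvSeq, List.range_succ]

theorem pvSeq_bounds (p : Bool) (k : Nat) : 2 ^ k ≤ pvSeq p k ∧ pvSeq p k < 2 ^ (k + 1) := by
  induction k with
  | zero => simp [pvSeq]
  | succ k ih =>
    rw [pvSeq_succ]
    rcases ih with ⟨h1, h2⟩
    constructor <;> rw [pow_succ] <;> split <;> omega

theorem pvTst_seq (p : Bool) (j : Nat) : pvTst p (pvSeq p (2 * j)) = pvSeq p (2 * j + 1) := by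
  rw [pvSeq_succ]
  have h : (2 * j) % 2 = 0 := by omega
  simp only [pvTst, pvM2, pvM2p1, Int.shiftLeft_eq, pow_one, h]
  cases p <;> simp

theorem pvAst_seq (p : Bool) (j : Nat) :
    pvAst p (pvSeq p (2 * j + 1)) = pvSeq p (2 * j + 2) := by
  have e1 := pvSeq_succ p (2 * j)
  have e2 := pvSeq_succ p (2 * j + 1)
  rw [show 2 * j + 2 = 2 * j + 1 + 1 from rfl, e2, e1]
  have h0 : (2 * j) % 2 = 0 := by omega
  have h1 : (2 * j + 1) % 2 = 1 := by omega
  simp only [pvM2, pvM2p1, Int.shiftLeft_eq, pow_one, h0, h1, pvAst]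
  cases p <;> simp

theorem pvGameLoop_congr (N : Int) (p : Bool) (x y : Int) (hx : 1 ≤ x) (hy : 1 ≤ y)
    (h : x = y) : pvGameLoop N p x hx = pvGameLoop N p y hy := by subst h; rfl

theorem pvGameLoop_stopT (N : Int) (p : Bool) (x : Int) (hx : 1 ≤ x)
    (h : N < pvTst p x) : pvGameLoop N p x hx = "Aoki" := by
  rw [pvGameLoop, if_pos h]

theorem pvGameLoop_stopA (N : Int) (p : Bool) (x : Int) (hx : 1 ≤ x)
    (h1 : ¬ N < pvTst p x) (h2 : N < pvAst p (pvTst p x)) :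
    pvGameLoop N p x hx = "Takahashi" := by
  rw [pvGameLoop, if_neg h1, if_pos h2]

theorem pvSeq_pos (p : Bool) (k : Nat) : 1 ≤ pvSeq p k := by
  have h1 := (pvSeq_bounds p k).1
  have h2 : (1 : Int) ≤ 2 ^ k := one_le_pow₀ (by norm_num)
  omega

theorem pvGameLoop_advance (N : Int) (p : Bool) (j : Nat)
    (h1 : pvSeq p (2 * j + 1) ≤ N) (h2 : pvSeq p (2 * j + 2) ≤ N) :
    pvGameLoop N p (pvSeq p (2 * j)) (pvSeq_pos p _) =
      pvGameLoop N p (pvSeq p (2 * j + 2)) (pvSeq_pos p _) := by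
  rw [pvGameLoop]
  rw [if_neg (by rw [pvTst_seq]; omega)]
  rw [if_neg (by rw [pvTst_seq, pvAst_seq]; omega)]
  exact pvGameLoop_congr _ _ _ _ _ _ (by rw [pvTst_seq, pvAst_seq])

theorem pvGameLoop_from (N : Int) (p : Bool) (j : Nat)
    (hall : ∀ k, k ≤ 2 * j → pvSeq p k ≤ N) :
    pvGameLoop N p 1 (by norm_num) = pvGameLoop N p (pvSeq p (2 * j)) (pvSeq_pos p _) := by
  induction j with
  | zero => exact pvGameLoop_congr _ _ _ _ _ _ (by simp [pvSeq])
  | succ j ih =>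
    rw [ih (fun k hk => hall k (by omega))]
    rw [show 2 * (j + 1) = 2 * j + 2 from rfl]
    exact pvGameLoop_advance N p j (hall _ (by omega)) (hall _ (by omega))

-- A's depth loop computes one less than bit_length on positive inputs
theorem pvDepthLoop_eq : ∀ (n d : Int), 1 ≤ n →
    pvDepthLoop n d = d + ((PySem.Int.bitLength n : Int) - 1) := by
  intro n d
  induction n, d using pvDepthLoop.induct with
  | case1 n d h ih =>
    intro _
    rw [pvDepthLoop, dif_pos h]
    have hsh : n >>> (1:Nat) = n / 2 := by rw [Int.shiftRight_eq_div_pow]; norm_num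
    have hfd : PySem.Int.floordiv n 2 = n / 2 := PySem.Int.floordiv_eq_ediv_of_pos (by norm_num)
    have hbl : PySem.Int.bitLength n = PySem.Int.bitLength (n / 2) + 1 := by
      rw [PySem.Int.bitLength_of_pos (by omega), hfd]
    have h1 : 1 ≤ n / 2 := by omega
    rw [ih (by omega)]
    rw [hsh, hbl]
    push_cast
    ring
  | case2 n d h =>
    intro hn
    have hn1 : n = 1 := by omega
    subst hn1
    rw [pvDepthLoop, dif_neg h]
    have : PySem.Int.bitLength 1 = 1 := by decide
    rw [this]
    norm_num

theorem pv_mod_two_cast (i : Nat) : (PySem.Int.mod (i:Int) 2 == 0) = (i % 2 == 0) := by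
  have h : PySem.Int.mod (i:Int) ((2:Nat):Int) = ((i % 2 : Nat) : Int) := PySem.Int.mod_natCast i 2
  rcases Nat.mod_two_eq_zero_or_one i with h2 | h2 <;> simp [h2] at h <;> simp [h, h2]

-- B's fold over pyRange is pvSeq
theorem pv_fold_eq (p : Bool) (d : Nat) :
    (PySem.List.pyRange 0 (d : Int) 1).foldl
      (fun T i => T * 2 + (if (PySem.Int.mod i 2 == 0) == p then 1 else 0)) 1 = pvSeq p d := by
  rw [PySem.List.pyRange_zero_natCast d, List.foldl_map, pvSeq]
  simp only [pv_mod_two_cast]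

theorem pv_main (N : Int) : baibai_chance N = baibai_chance_alt N := by
  by_cases hN : N < 2
  · -- N < 2: depth = 0, Takahashi's first move 3 > N, both sides "Aoki"
    simp only [baibai_chance, baibai_chance_alt, if_pos hN]
    have hd : pvDepthLoop N 0 = 0 := by rw [pvDepthLoop, dif_neg (by omega)]
    rw [hd]
    apply pvGameLoop_stopT
    have : pvTst (PySem.Int.mod 0 2 == 0) 1 = 3 := by decide
    rw [this]; omega
  · replace hN : 2 ≤ N := by omega
    -- names: d = bit_length - 1, p = parity, plus the two-power bracket around N
    set d : Nat := PySem.Int.bitLength N - 1 with hdef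
    set p : Bool := (d % 2 == 0) with hpdef
    have hbl2 : 2 ≤ PySem.Int.bitLength N := by
      by_contra hcon
      have h := PySem.Int.lt_two_pow_bitLength N
      have hle1 : 2 ^ PySem.Int.bitLength N ≤ 2 ^ 1 :=
        Nat.pow_le_pow_right (by norm_num) (by omega)
      omega
    have hd1 : 1 ≤ d := by omega
    have hdd : PySem.Int.bitLength N = d + 1 := by omega
    have hlow : (2:Int) ^ d ≤ N := by
      have h := PySem.Int.two_pow_bitLength_le N (by omega)
      rw [← hdef] at h
      have h2 : (((2:Nat) ^ d : Nat) : Int) ≤ (N.natAbs : Int) := Int.ofNat_le.mpr h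
      rw [Int.natAbs_of_nonneg (by omega)] at h2
      push_cast at h2
      exact h2
    have hhigh : N < (2:Int) ^ (d + 1) := by
      have h := PySem.Int.lt_two_pow_bitLength N
      rw [hdd] at h
      have h2 : (N.natAbs : Int) < (((2:Nat) ^ (d+1) : Nat) : Int) := Int.ofNat_lt.mpr h
      rw [Int.natAbs_of_nonneg (by omega)] at h2
      push_cast at h2
      exact h2
    -- A's p equals B's p
    have hdepth : pvDepthLoop N 0 = (d : Int) := by
      rw [pvDepthLoop_eq N 0 (by omega)]
      omega
    have hpA : (PySem.Int.mod (pvDepthLoop N 0) 2 == 0) = p := by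
      rw [hdepth, pv_mod_two_cast, hpdef]
    -- evaluate B
    have hB : baibai_chance_alt N =
        if N < pvSeq p d then (if p then "Takahashi" else "Aoki")
        else (if p then "Aoki" else "Takahashi") := by
      simp only [baibai_chance_alt, if_neg (by omega : ¬ N < 2), ← hdef, pv_fold_eq, ← hpdef]
    simp only [baibai_chance, hpA, hB]
    -- loop facts
    have hle : ∀ k, k + 1 ≤ d → pvSeq p k ≤ N := by
      intro k hk
      have h2 := (pvSeq_bounds p k).2
      have hpow : (2:Int) ^ (k+1) ≤ 2 ^ d := pow_le_pow_right₀ (by norm_num) hk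
      omega
    have hbig : N < pvSeq p (d + 1) := by
      have := (pvSeq_bounds p (d+1)).1
      omega
    rcases Nat.even_or_odd d with he | ho
    · -- d even (so d ≥ 2); Takahashi plays m2p1
      obtain ⟨j, hj⟩ := he
      have hj2 : d = 2 * j := by omega
      have hptrue : p = true := by rw [hpdef, hj2]; simp [Nat.mul_mod_right]
      have hj1 : 1 ≤ j := by omega
      by_cases hT : N < pvSeq p d
      · rw [pvGameLoop_from N p (j - 1) (fun k hk => hle k (by omega))]
        rw [pvGameLoop_stopA _ _ _ _ ?_ ?_]
        · rw [if_pos hT, hptrue]; rfl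
        · rw [pvTst_seq]
          have := hle (2 * (j - 1) + 1) (by omega)
          omega
        · rw [pvTst_seq, pvAst_seq, show 2 * (j - 1) + 2 = d by omega]
          exact hT
      · rw [pvGameLoop_from N p j (fun k hk => by
          rcases Nat.lt_or_ge k d with h | h
          · exact hle k (by omega)
          · have hkd : k = d := by omega
            rw [hkd]; omega)]
        rw [pvGameLoop_stopT _ _ _ _ ?_]
        · rw [if_neg hT, hptrue]; rfl
        · rw [pvTst_seq, show 2 * j + 1 = d + 1 by omega]
          exact hbig
    · -- d odd; Takahashi plays m2
      obtain ⟨j, hj⟩ := ho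
      have hpfalse : p = false := by rw [hpdef, hj]; simp
      rw [pvGameLoop_from N p j (fun k hk => hle k (by omega))]
      by_cases hT : N < pvSeq p d
      · rw [pvGameLoop_stopT _ _ _ _ ?_]
        · rw [if_pos hT, hpfalse]; rfl
        · rw [pvTst_seq, show 2 * j + 1 = d by omega]
          exact hT
      · rw [pvGameLoop_stopA _ _ _ _ ?_ ?_]
        · rw [if_neg hT, hpfalse]; rfl
        · rw [pvTst_seq, show 2 * j + 1 = d by omega]
          omega
        · rw [pvTst_seq, pvAst_seq, show 2 * j + 2 = d + 1 by omega]
          exact hbig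

-- ===== VERDICT (by name: the statement is the Claim_ definition above) =====
theorem baibai_chance_spec : Claim_equal_baibai_chance := by
  intro N _
  unfold Spec_baibai_chance
  exact pv_main N
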